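-- pv_equiv track=rewrite | github.com/MrBrantCode/unitest_baseline | mut_generate/mist_train_taco/taco_13545/solution.py | generate_valid_grid
-- ===== SOURCE A (Python) =====
-- def generate_valid_grid(K):
--     # Initialize the grid with zeros
--     grid = [[0 for _ in range(K)] for _ in range(K)]
--
--     # Calculate the center of the grid
--     center = (K + 1) // 2
--
--     # Place 1s in the grid according to the problem constraints
--     for i in range(K // 2 + 1):
--         grid[center - 1 + i][i] = 1
--     for i in range(K // 2):
--         grid[i][center + i] = 1
--
--     # Fill the rest of the grid with appropriate values
--     for i in range(K):
--         e = grid[i].index(1)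
--         for j in range(1, K):
--             grid[i][e - j] = j + 1
--
--     return grid
-- ===== SOURCE B (Python) =====
-- def generate_valid_grid(K):
--     center = (K + 1) // 2
--     base = [1] + list(range(K, 1, -1))  # value at offset c from the pivot column: (-c) % K + 1
--     grid = []
--     for i in range(K):
--         p = i - center + 1 if i >= center - 1 else center + i  # column of the row's first 1
--         grid.append(base[K - p:] + base[:K - p])
--     return grid
-- ===== Notes on version B (the rewrite author's own statement) =====
-- stated objective: simpler
-- what changed: B drops A's three-pass scheme (zero grid, two 1-placement loops, per-row .index search, per-cell fill through negative-index wraparound) and instead computes each row's pivot column by a closed-form case formula and emits the row as a slice-rotation of one precomputed base row [1, K, K-1, ..., 2].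
import Mathlib
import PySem

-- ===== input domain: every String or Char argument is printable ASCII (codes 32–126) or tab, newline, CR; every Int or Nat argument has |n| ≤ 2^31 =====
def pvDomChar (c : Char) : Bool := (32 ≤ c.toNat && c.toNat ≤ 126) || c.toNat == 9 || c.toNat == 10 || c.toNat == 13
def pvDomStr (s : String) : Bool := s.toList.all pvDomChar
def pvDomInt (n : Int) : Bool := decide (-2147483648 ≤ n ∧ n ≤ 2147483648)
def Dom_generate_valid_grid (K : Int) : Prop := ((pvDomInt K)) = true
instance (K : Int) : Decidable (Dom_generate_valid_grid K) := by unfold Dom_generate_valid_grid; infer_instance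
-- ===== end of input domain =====

-- B replaces A's three passes (place 1s, search with .index, fill with negative-index wrap)
-- by a closed-form pivot column per row and one rotated base row per row; return values proved equal for K ≠ 0.

-- ===== PORT A =====
def generate_valid_grid (K : Int) : List (List Int) :=
  let grid := (PySem.List.pyRange 0 K 1).map (fun _ => (PySem.List.pyRange 0 K 1).map (fun _ => (0 : Int)))
  let center := PySem.Int.floordiv (K + 1) 2
  let grid := (PySem.List.pyRange 0 (PySem.Int.floordiv K 2 + 1) 1).foldl
    (fun g i => PySem.List.pySetD g (center - 1 + i)
      (PySem.List.pySetD (PySem.List.pyGetD g (center - 1 + i) []) i 1)) grid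
  let grid := (PySem.List.pyRange 0 (PySem.Int.floordiv K 2) 1).foldl
    (fun g i => PySem.List.pySetD g i
      (PySem.List.pySetD (PySem.List.pyGetD g i []) (center + i) 1)) grid
  (PySem.List.pyRange 0 K 1).foldl
    (fun g i =>
      let e : Int := ((PySem.List.index? (PySem.List.pyGetD g i []) 1).getD 0 : Nat)
      (PySem.List.pyRange 1 K 1).foldl
        (fun g j => PySem.List.pySetD g i
          (PySem.List.pySetD (PySem.List.pyGetD g i []) (e - j) (j + 1))) g) grid

-- ===== PORT B =====
def generate_valid_grid_alt (K : Int) : List (List Int) :=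
  let center := PySem.Int.floordiv (K + 1) 2
  let base : List Int := 1 :: PySem.List.pyRange K 1 (-1)
  (PySem.List.pyRange 0 K 1).map (fun i =>
    let p := if i ≥ center - 1 then i - center + 1 else center + i
    PySem.List.slice base (some (K - p)) none ++ PySem.List.slice base none (some (K - p)))

-- ===== PRECONDITION & SPEC =====
-- Pre_ excludes only K = 0, where A raises IndexError (grid[-1] on an empty grid).
def Pre_generate_valid_grid (K : Int) : Prop := K ≠ 0
instance (K : Int) : Decidable (Pre_generate_valid_grid K) := by unfold Pre_generate_valid_grid; infer_instance
def pvWitness_generate_valid_grid : Int := 4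

def Spec_generate_valid_grid (K : Int) (out : List (List Int)) : Prop := out = generate_valid_grid_alt K
instance (K : Int) (out : List (List Int)) : Decidable (Spec_generate_valid_grid K out) := by unfold Spec_generate_valid_grid; infer_instance

-- ===== CLAIM (what is proved, stated in full; the proofs are below) =====
def Claim_equal_generate_valid_grid : Prop := ∀ (K : Int), Dom_generate_valid_grid K → Pre_generate_valid_grid K → Spec_generate_valid_grid K (generate_valid_grid K)

-- ===== LEMMAS AND PROOFS =====

-- x % n for x in (-n, n), as a case split usable by omega
theorem emod_cases (x : Int) (n : Nat) (hn : 0 < n) (h1 : -(n : Int) ≤ x) (h2 : x < n) :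
    x % (n : Int) = x ∨ x % (n : Int) = x + n := by
  by_cases h : 0 ≤ x
  · exact Or.inl (Int.emod_eq_of_lt h h2)
  · right
    have h3 : (x + (n : Int) * 1) % (n : Int) = x % n := Int.add_mul_emod_self_left x (n : Int) 1
    have h4 : (x + (n : Int)) % n = x + n := Int.emod_eq_of_lt (by omega) (by omega)
    calc x % (n : Int) = (x + (n : Int) * 1) % n := by rw [h3]
    _ = (x + (n : Int)) % n := by ring_nf
    _ = x + n := h4

-- pyIdx?-level facts about pySetD / pyGetD
theorem pySetD_of_idx {α : Type} (xs : List α) (i : Int) (v : α) (t : Nat)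
    (ht : PySem.List.pyIdx? xs.length i = some t) :
    PySem.List.pySetD xs i v = xs.set t v := by
  simp [PySem.List.pySetD, PySem.List.pySet?, ht]

theorem pySetD_of_noidx {α : Type} (xs : List α) (i : Int) (v : α)
    (ht : PySem.List.pyIdx? xs.length i = none) :
    PySem.List.pySetD xs i v = xs := by
  simp [PySem.List.pySetD, PySem.List.pySet?, ht]

theorem pyIdx?_lt {n : Nat} {i : Int} {t : Nat}
    (ht : PySem.List.pyIdx? n i = some t) : t < n := by
  unfold PySem.List.pyIdx? at ht
  split_ifs at ht <;> simp_all <;> omega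

theorem pyGetD_of_idx {α : Type} (xs : List α) (i : Int) (d : α) (t : Nat)
    (ht : PySem.List.pyIdx? xs.length i = some t) :
    PySem.List.pyGetD xs i d = xs[t]'(pyIdx?_lt ht) := by
  have h := pyIdx?_lt ht
  simp [PySem.List.pyGetD, PySem.List.pyGet?, ht, List.getElem?_eq_getElem h]

theorem pyIdx?_emod {n : Nat} {i : Int} (hn : 0 < n) (h1 : -(n : Int) ≤ i) (h2 : i < n) :
    PySem.List.pyIdx? n i = some ((i % (n : Int)).toNat) := by
  have hd0 : 0 ≤ i % (n : Int) := Int.emod_nonneg _ (by omega)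
  have hd1 : i % (n : Int) < n := Int.emod_lt_of_pos _ (by exact_mod_cast hn)
  have hc := emod_cases i n hn h1 h2
  unfold PySem.List.pyIdx?
  by_cases ha : 0 ≤ i
  · rw [if_pos ha, if_pos h2]
    refine congrArg some ?_
    rcases hc with h | h <;> rw [h] at hd0 hd1 ⊢ <;> omega
  · rw [if_neg ha, if_pos h1]
    refine congrArg some ?_
    rcases hc with h | h <;> rw [h] at hd0 hd1 ⊢ <;> omega

theorem pySetD_emod {α : Type} (xs : List α) (i : Int) (v : α) (hn : 0 < xs.length)
    (h1 : -(xs.length : Int) ≤ i) (h2 : i < xs.length) :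
    PySem.List.pySetD xs i v = xs.set ((i % (xs.length : Int)).toNat) v :=
  pySetD_of_idx xs i v _ (pyIdx?_emod hn h1 h2)

-- the inner fill loop only ever touches row i: it may be pulled out of the grid
theorem fold_row_local (js : List Int) (i : Int) (F : List Int → Int → List Int)
    (g : List (List Int)) :
    js.foldl (fun g j => PySem.List.pySetD g i (F (PySem.List.pyGetD g i []) j)) g
      = PySem.List.pySetD g i (js.foldl F (PySem.List.pyGetD g i [])) := by
  induction js generalizing g with
  | nil =>
    cases ht : PySem.List.pyIdx? g.length i with
    | none => simp [pySetD_of_noidx _ _ _ ht]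
    | some t =>
      simp [pySetD_of_idx _ _ _ _ ht, pyGetD_of_idx _ _ _ _ ht, List.set_getElem_self]
  | cons j js ih =>
    simp only [List.foldl_cons]
    rw [ih]
    cases ht : PySem.List.pyIdx? g.length i with
    | none =>
      rw [pySetD_of_noidx _ _ _ ht, pySetD_of_noidx _ _ _ ht, pySetD_of_noidx _ _ _ ht]
    | some t =>
      rw [pySetD_of_idx _ _ _ _ ht]
      have ht' : PySem.List.pyIdx? (g.set t (F (PySem.List.pyGetD g i []) j)).length i = some t := by
        simpa using ht
      rw [pyGetD_of_idx _ _ _ _ ht', pySetD_of_idx _ _ _ _ ht', pySetD_of_idx _ _ _ _ ht]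
      simp [pyGetD_of_idx _ _ _ _ ht, List.set_set]

-- generic characterisation of a fold that rewrites rows R k with f k
def rfold (R : Nat → Nat) (f : Nat → List Int → List Int) (m : Nat)
    (g : List (List Int)) : List (List Int) :=
  (List.range m).foldl (fun g k => g.set (R k) (f k (g.getD (R k) []))) g

theorem rfold_succ (R : Nat → Nat) (f : Nat → List Int → List Int) (m : Nat)
    (g : List (List Int)) :
    rfold R f (m + 1) g = (rfold R f m g).set (R m) (f m ((rfold R f m g).getD (R m) [])) := by
  simp [rfold, List.range_succ]

theorem rfold_length (R : Nat → Nat) (f : Nat → List Int → List Int) (m : Nat)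
    (g : List (List Int)) : (rfold R f m g).length = g.length := by
  induction m with
  | zero => rfl
  | succ m ih => rw [rfold_succ]; simp [ih]

theorem rfold_miss (R : Nat → Nat) (f : Nat → List Int → List Int) (m : Nat)
    (g : List (List Int)) (r : Nat) (hr : r < g.length)
    (hmiss : ∀ k, k < m → R k ≠ r) :
    (rfold R f m g)[r]'(by rw [rfold_length]; exact hr) = g[r] := by
  induction m with
  | zero => rfl
  | succ m ih =>
    simp only [rfold_succ]
    rw [List.getElem_set]
    rw [if_neg (hmiss m (Nat.lt_succ_self m))]
    exact ih (fun k hk => hmiss k (Nat.lt_succ_of_lt hk))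

theorem rfold_hit (R : Nat → Nat) (f : Nat → List Int → List Int) (m : Nat)
    (g : List (List Int)) (k : Nat) (hk : k < m) (hR : R k < g.length)
    (hinj : ∀ a b, a < m → b < m → R a = R b → a = b) :
    (rfold R f m g)[R k]'(by rw [rfold_length]; exact hR) = f k (g[R k]) := by
  induction m with
  | zero => omega
  | succ m ih =>
    simp only [rfold_succ]
    rcases Nat.lt_or_ge k m with hkm | hkm
    · have hne : R m ≠ R k := fun h => by
        have := hinj m k (Nat.lt_succ_self m) (Nat.lt_succ_of_lt hkm) h; omega
      rw [List.getElem_set, if_neg hne]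
      exact ih hkm (fun a b ha hb => hinj a b (Nat.lt_succ_of_lt ha) (Nat.lt_succ_of_lt hb))
    · have hkm' : k = m := by omega
      subst hkm'
      have hmiss : ∀ a, a < k → R a ≠ R k := fun a ha h => by
        have := hinj a k (Nat.lt_succ_of_lt ha) (Nat.lt_succ_self k) h; omega
      have hg : (rfold R f k g).getD (R k) [] = g[R k] := by
        rw [List.getD_eq_getElem _ _ (by rw [rfold_length]; exact hR)]
        exact rfold_miss R f k g (R k) hR hmiss
      rw [List.getElem_set, if_pos rfl, hg]

theorem rfold_hit' (R : Nat → Nat) (f : Nat → List Int → List Int) (m : Nat)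
    (g : List (List Int)) (k r : Nat) (hk : k < m) (hr : r < g.length) (hRk : R k = r)
    (hinj : ∀ a b, a < m → b < m → R a = R b → a = b) :
    (rfold R f m g)[r]'(by rw [rfold_length]; exact hr) = f k (g[r]) := by
  subst hRk
  exact rfold_hit R f m g k hk hr hinj

-- the grid rows after the two placement loops
def row1 (n r : Nat) : List Int :=
  if (n + 1) / 2 - 1 ≤ r then (List.replicate n (0 : Int)).set (r - ((n + 1) / 2 - 1)) 1
  else List.replicate n (0 : Int)

def row2 (n r : Nat) : List Int :=
  if r < n / 2 then (row1 n r).set ((n + 1) / 2 + r) 1 else row1 n r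

def pivN (n r : Nat) : Nat := if (n + 1) / 2 - 1 ≤ r then r - ((n + 1) / 2 - 1) else (n + 1) / 2 + r

theorem row2_length (n r : Nat) : (row2 n r).length = n := by
  unfold row2 row1; split_ifs <;> simp

theorem pivN_lt (n r : Nat) (hn : 0 < n) (hr : r < n) : pivN n r < n := by
  unfold pivN; split_ifs <;> omega

theorem row2_getElem? (n r c : Nat) (hn : 0 < n) (hr : r < n) (hc : c < n) :
    (row2 n r)[c]? = some (if c = pivN n r ∨ (r < n / 2 ∧ c = (n + 1) / 2 + r) then 1 else 0) := by
  unfold row2 row1 pivN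
  by_cases h2 : r < n / 2 <;> by_cases h1 : (n + 1) / 2 - 1 ≤ r <;>
    simp only [h1, h2, if_true, if_false] <;>
    simp only [List.getElem?_set, List.getElem?_replicate, List.length_set,
      List.length_replicate] <;>
    split_ifs <;> simp_all <;> omega

theorem row2_getElem (n r c : Nat) (hn : 0 < n) (hr : r < n) (hc : c < n) :
    (row2 n r)[c]'(by rw [row2_length]; exact hc)
      = if c = pivN n r ∨ (r < n / 2 ∧ c = (n + 1) / 2 + r) then 1 else 0 := by
  have h := row2_getElem? n r c hn hr hc
  rw [List.getElem?_eq_getElem (by rw [row2_length]; exact hc)] at h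
  exact Option.some_inj.mp h

theorem index?_of_first {α : Type} [BEq α] [LawfulBEq α] (xs : List α) (v : α) (k : Nat)
    (hk : k < xs.length) (h1 : xs[k] = v) (h0 : ∀ j (hj : j < k), xs[j]'(by omega) ≠ v) :
    PySem.List.index? xs v = some k := by
  rw [PySem.List.index?_eq_some_iff]
  refine ⟨xs.take k, xs.drop (k + 1), ?_, by simp [Nat.le_of_lt hk], ?_⟩
  · conv_lhs => rw [← List.take_append_drop k xs]
    rw [← List.getElem_cons_drop hk, h1]
  · intro hv
    rw [List.mem_take_iff_getElem] at hv
    obtain ⟨j, hj, hjv⟩ := hv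
    exact h0 j (by omega) (by simpa using hjv)

theorem row2_index (n r : Nat) (hn : 0 < n) (hr : r < n) :
    PySem.List.index? (row2 n r) 1 = some (pivN n r) := by
  have hpiv := pivN_lt n r hn hr
  apply index?_of_first _ _ _ (by rw [row2_length]; exact hpiv)
  · rw [row2_getElem n r (pivN n r) hn hr hpiv]
    simp
  · intro j hj
    have hjn : j < n := lt_trans hj hpiv
    rw [row2_getElem n r j hn hr hjn]
    have hne : ¬ (j = pivN n r ∨ (r < n / 2 ∧ j = (n + 1) / 2 + r)) := by
      unfold pivN at *; split_ifs at * <;> omega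
    simp [hne]

-- the fill loop: e - j indices wrap modulo n
theorem fill_length (e : Int) (js : List Int) (row : List Int) :
    (js.foldl (fun rr j => PySem.List.pySetD rr (e - j) (j + 1)) row).length = row.length := by
  induction js generalizing row with
  | nil => rfl
  | cons j js ih => simp [List.foldl_cons, ih, PySem.List.length_pySetD]

theorem fill_charac? (n : Nat) (hn : 0 < n) (e : Int) (he0 : 0 ≤ e) (he1 : e < n)
    (row : List Int) (hlen : row.length = n) (m : Nat) (hm : m ≤ n) (c : Nat) (hc : c < n) :
    ((PySem.List.pyRange 1 (m : Int) 1).foldl (fun rr j => PySem.List.pySetD rr (e - j) (j + 1)) row)[c]?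
      = some (if 1 ≤ (e - c) % (n : Int) ∧ (e - c) % (n : Int) ≤ (m : Int) - 1
              then (e - c) % (n : Int) + 1 else row[c]'(by omega)) := by
  have hd0 : 0 ≤ (e - (c : Int)) % (n : Int) := Int.emod_nonneg _ (by omega)
  have hd1 : (e - (c : Int)) % (n : Int) < n := Int.emod_lt_of_pos _ (by exact_mod_cast hn)
  have hD := emod_cases (e - (c : Int)) n hn (by omega) (by omega)
  generalize hDg : (e - (c : Int)) % (n : Int) = D at hd0 hd1 hD ⊢
  revert hm
  induction m with
  | zero =>
    intro hm
    rw [PySem.List.pyRange_one_eq_nil (by norm_num), List.foldl_nil,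
      List.getElem?_eq_getElem (show c < row.length by omega), if_neg (by push_cast; omega)]
  | succ m ih =>
    intro hm
    rcases Nat.eq_zero_or_pos m with hm0 | hm0
    · subst hm0
      rw [PySem.List.pyRange_one_eq_nil (by norm_num), List.foldl_nil,
        List.getElem?_eq_getElem (show c < row.length by omega), if_neg (by push_cast; omega)]
    · have hsplit : PySem.List.pyRange 1 ((m : Int) + 1) 1 = PySem.List.pyRange 1 (m : Int) 1 ++ [(m : Int)] :=
        PySem.List.pyRange_one_succ_right (by exact_mod_cast hm0)
      rw [show ((m + 1 : Nat) : Int) = (m : Int) + 1 by push_cast; ring, hsplit,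
        List.foldl_append, List.foldl_cons, List.foldl_nil]
      have hplen : ((PySem.List.pyRange 1 (m : Int) 1).foldl
          (fun rr j => PySem.List.pySetD rr (e - j) (j + 1)) row).length = n := by
        rw [fill_length, hlen]
      have hE0 : 0 ≤ (e - (m : Int)) % (n : Int) := Int.emod_nonneg _ (by omega)
      have hE1 : (e - (m : Int)) % (n : Int) < n := Int.emod_lt_of_pos _ (by exact_mod_cast hn)
      have hE := emod_cases (e - (m : Int)) n hn (by omega) (by omega)
      rw [pySetD_emod _ _ _ (by omega) (by rw [hplen]; push_cast; omega)
        (by rw [hplen]; push_cast; omega), hplen]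
      generalize hEg : (e - (m : Int)) % (n : Int) = E at hE0 hE1 hE ⊢
      rw [List.getElem?_set]
      by_cases hx : E.toNat = c
      · have hDm : D = (m : Int) := by
          rcases hD with h | h <;> rcases hE with h' | h' <;> omega
        rw [if_pos hx]
        rw [if_pos (by rw [hplen]; omega)]
        rw [hDm]
        rw [if_pos (by push_cast; omega)]
      · have hDm : D ≠ (m : Int) := by
          rcases hD with h | h <;> rcases hE with h' | h' <;> omega
        rw [if_neg hx, ih (by omega)]
        by_cases hcond : 1 ≤ D ∧ D ≤ (m : Int) - 1
        · rw [if_pos hcond, if_pos (by push_cast; omega)]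
        · rw [if_neg hcond, if_neg (by push_cast; omega)]

-- the final row A produces for row r, and B's closed-form row, coincide
theorem final_row_eq (n r : Nat) (hn : 0 < n) (hr : r < n) :
    (PySem.List.pyRange 1 (n : Int) 1).foldl
        (fun rr j => PySem.List.pySetD rr ((pivN n r : Int) - j) (j + 1)) (row2 n r)
      = (List.range n).map (fun c : Nat => ((pivN n r : Int) - (c : Int)) % (n : Int) + 1) := by
  have hpiv := pivN_lt n r hn hr
  apply List.ext_getElem?
  intro c
  by_cases hc : c < n
  · rw [fill_charac? n hn (pivN n r) (by positivity) (by exact_mod_cast hpiv) (row2 n r)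
      (row2_length n r) n le_rfl c hc]
    rw [List.getElem?_map, List.getElem?_range (by simpa using hc)]
    refine congrArg some ?_
    simp only [Option.map_some]
    have hd0 : 0 ≤ ((pivN n r : Int) - c) % (n : Int) := Int.emod_nonneg _ (by omega)
    have hd1 : ((pivN n r : Int) - c) % (n : Int) < n := Int.emod_lt_of_pos _ (by exact_mod_cast hn)
    have hD := emod_cases ((pivN n r : Int) - c) n hn (by omega) (by omega)
    by_cases hcond : 1 ≤ ((pivN n r : Int) - c) % (n : Int) ∧ ((pivN n r : Int) - c) % (n : Int) ≤ (n : Int) - 1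
    · rw [if_pos hcond]
    · rw [if_neg hcond]
      have hce : c = pivN n r := by
        rcases hD with h | h <;> rw [h] at hd0 hd1 hcond <;> omega
      have hz : ((pivN n r : Int) - c) % (n : Int) = 0 := by
        rcases hD with h | h <;> rw [h] at hd0 hd1 hcond ⊢ <;> omega
      rw [hz, row2_getElem n r c hn hr hc, if_pos (Or.inl hce)]
      norm_num
  · rw [List.getElem?_eq_none (by rw [fill_length, row2_length]; omega),
      List.getElem?_eq_none (by simp; omega)]

-- both sides for positive K, assembled
theorem pos_case (n : Nat) (hn : 0 < n) :
    generate_valid_grid (n : Int) = generate_valid_grid_alt (n : Int) := by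
  have h2 : (0 : Int) < 2 := by norm_num
  have hc01 : 1 ≤ (n + 1) / 2 := by omega
  have hcenter : PySem.Int.floordiv ((n : Int) + 1) 2 = (((n + 1) / 2 : Nat) : Int) := by
    rw [PySem.Int.floordiv_eq_ediv_of_pos h2]; omega
  have hhalf : PySem.Int.floordiv (n : Int) 2 = ((n / 2 : Nat) : Int) := by
    rw [PySem.Int.floordiv_eq_ediv_of_pos h2]; omega
  -- B as a Nat-indexed double map
  have hblen : ((1 : Int) :: PySem.List.pyRange (n : Int) 1 (-1)).length = n := by
    rw [List.length_cons, PySem.List.length_pyRange_neg_one]; omega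
  have hbget : ∀ j, ∀ hj : j < n,
      ((1 : Int) :: PySem.List.pyRange (n : Int) 1 (-1))[j]'(by rw [hblen]; exact hj)
        = if j = 0 then 1 else (n : Int) + 1 - j := by
    intro j hj
    cases j with
    | zero => simp
    | succ k =>
      rw [List.getElem_cons_succ, List.getElem_of_eq (PySem.List.pyRange_neg_one (n : Int) 1)
        (by rw [PySem.List.length_pyRange_neg_one] at *; omega)]
      rw [List.getElem_map, List.getElem_range, if_neg (by omega)]
      push_cast; ring
  have hB : generate_valid_grid_alt (n : Int)
      = (List.range n).map (fun r : Nat => (List.range n).map (fun c : Nat => ((pivN n r : Int) - (c : Int)) % (n : Int) + 1)) := by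
    unfold generate_valid_grid_alt
    rw [hcenter, PySem.List.pyRange_one 0 (n : Int)]
    simp only [Int.sub_zero, Int.toNat_natCast, List.map_map]
    apply List.map_congr_left
    intro r hrm
    rw [List.mem_range] at hrm
    simp only [Function.comp_apply]
    have hprange := pivN_lt n r hn hrm
    have hpiv : (if (0 : Int) + (r : Int) ≥ (((n + 1) / 2 : Nat) : Int) - 1
          then (0 : Int) + (r : Int) - (((n + 1) / 2 : Nat) : Int) + 1
          else (((n + 1) / 2 : Nat) : Int) + ((0 : Int) + (r : Int)))
        = ((pivN n r : Nat) : Int) := by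
      unfold pivN; split_ifs <;> omega
    rw [hpiv]
    rw [PySem.List.slice_from _ (by omega), PySem.List.slice_to _ (by omega),
      show (((n : Nat) : Int) - ((pivN n r : Nat) : Int)).toNat = n - pivN n r by omega]
    apply List.ext_getElem
    · rw [List.length_append, List.length_drop, List.length_take, hblen, List.length_map,
        List.length_range]
      omega
    · intro c h1 h2
      have hc : c < n := by simpa using h2
      rw [List.getElem_map, List.getElem_range, List.getElem_append]
      have hd0 : 0 ≤ ((pivN n r : Int) - c) % (n : Int) := Int.emod_nonneg _ (by omega)
      have hd1 : ((pivN n r : Int) - c) % (n : Int) < n := Int.emod_lt_of_pos _ (by exact_mod_cast hn)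
      have hD := emod_cases ((pivN n r : Int) - c) n hn (by omega) (by omega)
      by_cases hcp : c < (((1 : Int) :: PySem.List.pyRange (n : Int) 1 (-1)).drop (n - pivN n r)).length
      · rw [dif_pos hcp]
        rw [List.length_drop, hblen] at hcp
        rw [List.getElem_drop, hbget (n - pivN n r + c) (by omega)]
        rcases hD with h | h <;> rw [h] at hd0 hd1 ⊢ <;> split_ifs <;> omega
      · rw [dif_neg hcp]
        rw [List.length_drop, hblen] at hcp
        simp only [List.length_drop, hblen]
        rw [List.getElem_take, hbget (c - (n - (n - pivN n r))) (by omega)]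
        rcases hD with h | h <;> rw [h] at hd0 hd1 ⊢ <;> split_ifs <;> omega
  -- A, phase by phase
  unfold generate_valid_grid
  simp only []
  rw [hcenter, hhalf, hB]
  -- initial grid = replicate n (replicate n 0)
  have hinit : (PySem.List.pyRange 0 (n : Int) 1).map
        (fun _ => (PySem.List.pyRange 0 (n : Int) 1).map (fun _ => (0 : Int)))
      = List.replicate n (List.replicate n (0 : Int)) := by
    rw [PySem.List.pyRange_one]
    simp [Function.comp_def, List.map_const']
  rw [hinit]
  -- phase 1 as an rfold
  have hphase1 : ∀ g : List (List Int),
      (PySem.List.pyRange 0 (((n / 2 : Nat) : Int) + 1) 1).foldl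
        (fun g i => PySem.List.pySetD g ((((n + 1) / 2 : Nat) : Int) - 1 + i)
          (PySem.List.pySetD (PySem.List.pyGetD g ((((n + 1) / 2 : Nat) : Int) - 1 + i) []) i 1)) g
      = rfold (fun k => (n + 1) / 2 - 1 + k) (fun k row => row.set k 1) (n / 2 + 1) g := by
    intro g
    rw [PySem.List.pyRange_one,
      show ((((n / 2 : Nat) : Int) + 1 - 0)).toNat = n / 2 + 1 by omega, List.foldl_map]
    apply PySem.List.foldl_congr_mem
    intro g' k _
    have hcast : ((((n + 1) / 2 : Nat) : Int) - 1 + (0 + (k : Int))) = (((n + 1) / 2 - 1 + k : Nat) : Int) := by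
      omega
    rw [hcast, show ((0 : Int) + (k : Int)) = ((k : Nat) : Int) by ring,
      PySem.List.pySetD_natCast, PySem.List.pyGetD_natCast, PySem.List.pySetD_natCast]
  -- phase 2 as an rfold
  have hphase2 : ∀ g : List (List Int),
      (PySem.List.pyRange 0 ((n / 2 : Nat) : Int) 1).foldl
        (fun g i => PySem.List.pySetD g i
          (PySem.List.pySetD (PySem.List.pyGetD g i []) ((((n + 1) / 2 : Nat) : Int) + i) 1)) g
      = rfold (fun k => k) (fun k row => row.set ((n + 1) / 2 + k) 1) (n / 2) g := by
    intro g
    rw [PySem.List.pyRange_one, show (((n / 2 : Nat) : Int) - 0).toNat = n / 2 by omega,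
      List.foldl_map]
    apply PySem.List.foldl_congr_mem
    intro g' k _
    have hcast : ((((n + 1) / 2 : Nat) : Int) + (0 + (k : Int))) = (((n + 1) / 2 + k : Nat) : Int) := by
      omega
    rw [hcast, show ((0 : Int) + (k : Int)) = ((k : Nat) : Int) by ring,
      PySem.List.pySetD_natCast, PySem.List.pyGetD_natCast, PySem.List.pySetD_natCast]
  -- phase 3 as an rfold
  have hphase3 : ∀ g : List (List Int),
      (PySem.List.pyRange 0 (n : Int) 1).foldl
        (fun g i =>
          (PySem.List.pyRange 1 (n : Int) 1).foldl
            (fun gg j => PySem.List.pySetD gg i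
              (PySem.List.pySetD (PySem.List.pyGetD gg i [])
                ((((PySem.List.index? (PySem.List.pyGetD g i []) 1).getD 0 : Nat) : Int) - j) (j + 1))) g) g
      = rfold (fun k => k)
          (fun _ row => (PySem.List.pyRange 1 (n : Int) 1).foldl
            (fun rr j => PySem.List.pySetD rr
              ((((PySem.List.index? row 1).getD 0 : Nat) : Int) - j) (j + 1)) row) n g := by
    intro g
    rw [PySem.List.pyRange_one 0 (n : Int), show (((n : Nat) : Int) - 0).toNat = n by omega,
      List.foldl_map]
    apply PySem.List.foldl_congr_mem
    intro g' k _
    rw [show ((0 : Int) + (k : Int)) = ((k : Nat) : Int) by ring]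
    rw [fold_row_local (PySem.List.pyRange 1 (n : Int) 1) ((k : Nat) : Int)
      (fun row j => PySem.List.pySetD row ((((PySem.List.index? (PySem.List.pyGetD g' ((k : Nat) : Int) []) 1).getD 0 : Nat) : Int) - j) (j + 1)) g']
    rw [PySem.List.pySetD_natCast, PySem.List.pyGetD_natCast]
  rw [hphase1, hphase2, hphase3]
  -- evaluate the three rfolds row by row
  have hlen1 : (rfold (fun k => (n + 1) / 2 - 1 + k) (fun k row => row.set k 1) (n / 2 + 1)
      (List.replicate n (List.replicate n (0 : Int)))).length = n := by
    rw [rfold_length, List.length_replicate]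
  have hg1 : rfold (fun k => (n + 1) / 2 - 1 + k) (fun k row => row.set k 1) (n / 2 + 1)
      (List.replicate n (List.replicate n (0 : Int))) = (List.range n).map (row1 n) := by
    apply List.ext_getElem
    · rw [hlen1]; simp
    · intro r hr1 hr2
      have hr : r < n := by simpa using hr2
      rw [List.getElem_map, List.getElem_range]
      by_cases hhit : (n + 1) / 2 - 1 ≤ r
      · rw [rfold_hit' _ _ _ _ (r - ((n + 1) / 2 - 1)) r (by omega) (by simpa using hr)
          (by omega) (by intro a b _ _ h; omega)]
        rw [List.getElem_replicate]
        unfold row1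
        rw [if_pos hhit]
      · rw [rfold_miss _ _ _ _ r (by simpa using hr) (by intro k _; omega)]
        rw [List.getElem_replicate]
        unfold row1
        rw [if_neg hhit]
  rw [hg1]
  have hlen2 : (rfold (fun k => k) (fun k row => row.set ((n + 1) / 2 + k) 1) (n / 2)
      ((List.range n).map (row1 n))).length = n := by
    rw [rfold_length]; simp
  have hg2 : rfold (fun k => k) (fun k row => row.set ((n + 1) / 2 + k) 1) (n / 2)
      ((List.range n).map (row1 n)) = (List.range n).map (row2 n) := by
    apply List.ext_getElem
    · rw [hlen2]; simp
    · intro r hr1 hr2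
      have hr : r < n := by simpa using hr2
      rw [List.getElem_map, List.getElem_range]
      by_cases hhit : r < n / 2
      · rw [rfold_hit' _ _ _ _ r r hhit (by simpa using hr) rfl (by intro a b _ _ h; omega)]
        rw [List.getElem_map, List.getElem_range]
        unfold row2
        rw [if_pos hhit]
      · rw [rfold_miss _ _ _ _ r (by simpa using hr) (by intro k hk; omega)]
        rw [List.getElem_map, List.getElem_range]
        unfold row2
        rw [if_neg hhit]
  rw [hg2]
  -- final pass
  apply List.ext_getElem
  · rw [rfold_length]; simp
  · intro r hr1 hr2
    have hr : r < n := by simpa using hr2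
    rw [List.getElem_map, List.getElem_range]
    rw [rfold_hit' _ _ _ _ r r hr (by simpa using hr) rfl (by intro a b _ _ h; omega)]
    rw [List.getElem_map, List.getElem_range]
    rw [row2_index n r hn hr]
    simp only [Option.getD_some]
    exact final_row_eq n r hn hr

-- negative K: every range is empty, both sides return []
theorem neg_case_a (K : Int) (hK : K < 0) : generate_valid_grid K = [] := by
  have e1 : PySem.List.pyRange 0 K 1 = [] := PySem.List.pyRange_one_eq_nil (by omega)
  have e2 : PySem.List.pyRange 0 (PySem.Int.floordiv K 2 + 1) 1 = [] := by
    rw [PySem.Int.floordiv_eq_ediv_of_pos (by norm_num)]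
    exact PySem.List.pyRange_one_eq_nil (by omega)
  have e3 : PySem.List.pyRange 0 (PySem.Int.floordiv K 2) 1 = [] := by
    rw [PySem.Int.floordiv_eq_ediv_of_pos (by norm_num)]
    exact PySem.List.pyRange_one_eq_nil (by omega)
  unfold generate_valid_grid
  rw [e1, e2, e3]
  simp

theorem neg_case_b (K : Int) (hK : K < 0) : generate_valid_grid_alt K = [] := by
  have e1 : PySem.List.pyRange 0 K 1 = [] := PySem.List.pyRange_one_eq_nil (by omega)
  unfold generate_valid_grid_alt
  rw [e1]
  simp

-- ===== VERDICT (by name: the statement is the Claim_ definition above) =====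
theorem generate_valid_grid_spec : Claim_equal_generate_valid_grid := by
  intro K _ hpre
  unfold Spec_generate_valid_grid
  unfold Pre_generate_valid_grid at hpre
  rcases lt_trichotomy K 0 with h | h | h
  · rw [neg_case_a K h, neg_case_b K h]
  · exact absurd h hpre
  · have hK : K = ((K.toNat : Nat) : Int) := by omega
    rw [hK]
    exact pos_case K.toNat (by omega)
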